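-- pv_equiv track=rewrite | github.com/HaoboChen1887/Purdue | ece364/Prelab03/simpleTasks.py | getStreaks
-- ===== SOURCE A (Python) =====
-- def getStreaks(sequence, letters):
--     seqlen = len(sequence)
--     keylen = len(letters)
--
--     curr = ""
--     result = []
--     for p_idx in range(0, seqlen):
--         for k_idx in range(0, keylen):
--             if letters[k_idx] == sequence[p_idx]:
--                 curr += sequence[p_idx]
--                 break
--         if p_idx + 1 < seqlen:
--             if sequence[p_idx] != sequence[p_idx + 1] and curr != "":
--                 result.append(curr)
--                 curr = ""
--         elif curr != "":
--             result.append(curr)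
--
--     return result
-- ===== SOURCE B (Python) =====
-- def getStreaks(sequence, letters):
--     runs = []
--     i = 0
--     n = len(sequence)
--     while i < n:
--         j = i
--         while j < n and sequence[j] == sequence[i]:
--             j += 1
--         runs.append(sequence[i:j])
--         i = j
--     return [r for r in runs if r[0] in letters]
-- ===== Notes on version B (the rewrite author's own statement) =====
-- stated objective: simpler
-- what changed: B splits the sequence into maximal runs of equal characters by index jumps and then filters runs whose character is in letters, replacing A's per-character accumulator with an inner letters scan and lookahead boundary flushing.
import Mathlib
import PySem

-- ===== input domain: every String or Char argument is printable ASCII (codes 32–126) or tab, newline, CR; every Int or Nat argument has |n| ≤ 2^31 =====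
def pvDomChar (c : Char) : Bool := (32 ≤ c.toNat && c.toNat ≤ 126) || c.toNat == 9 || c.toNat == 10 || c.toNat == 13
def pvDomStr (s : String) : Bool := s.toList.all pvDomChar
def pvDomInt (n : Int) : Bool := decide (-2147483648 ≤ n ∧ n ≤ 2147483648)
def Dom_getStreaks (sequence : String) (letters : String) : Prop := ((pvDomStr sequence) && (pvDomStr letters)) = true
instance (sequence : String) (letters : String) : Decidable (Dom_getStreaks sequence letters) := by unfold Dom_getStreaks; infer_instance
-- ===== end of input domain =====

-- B splits the sequence into maximal runs of equal characters and filters them by membership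
-- in letters, replacing A's accumulator-plus-lookahead loop (objective: simpler).


-- ===== PORT A =====
-- A's for-loop over p_idx; state (curr, result); the lookahead sequence[p_idx+1] is the head of
-- the remaining list; the inner for/break over letters is the linear membership scan `contains`.
def pvLoopA (letters : List Char) : List Char → List Char → List String → List String
  | [], _curr, result => result
  | c :: rest, curr, result =>
    let curr' := if letters.contains c then curr ++ [c] else curr
    match rest with
    | d :: _ =>
      if d ≠ c ∧ curr' ≠ [] then pvLoopA letters rest [] (result ++ [String.ofList curr'])
      else pvLoopA letters rest curr' result
    | [] => if curr' ≠ [] then result ++ [String.ofList curr'] else result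

def getStreaks (sequence : String) (letters : String) : List String :=
  pvLoopA letters.toList sequence.toList [] []

-- ===== PORT B =====
-- Source B's outer while loop: peel one maximal run of equal characters per step.
def pvRuns : List Char → List (List Char)
  | [] => []
  | c :: rest => (c :: rest.takeWhile (· == c)) :: pvRuns (rest.dropWhile (· == c))
  termination_by l => l.length
  decreasing_by simpa using Nat.lt_succ_of_le (rest.length_dropWhile_le (· == c))

-- Source B's final comprehension: keep runs whose character is in letters.
def getStreaks_alt (sequence : String) (letters : String) : List String :=
  ((pvRuns sequence.toList).filter
      (fun r => match r with | [] => false | c :: _ => letters.toList.contains c)).map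
    (fun r => String.ofList r)

-- ===== PRECONDITION & SPEC =====
def Spec_getStreaks (sequence : String) (letters : String) (out : List String) : Prop := out = getStreaks_alt sequence letters
instance (sequence : String) (letters : String) (out : List String) : Decidable (Spec_getStreaks sequence letters out) := by unfold Spec_getStreaks; infer_instance

-- ===== CLAIM (what is proved, stated in full; the proofs are below) =====
def Claim_equal_getStreaks : Prop := ∀ (sequence : String) (letters : String), Dom_getStreaks sequence letters → Spec_getStreaks sequence letters (getStreaks sequence letters)

-- ===== LEMMAS AND PROOFS =====

-- Processing one whole run of k+1 copies of c (next char, if any, differs from c) flushes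
-- curr extended by the matched copies of c, exactly once, at the run boundary.
theorem pvLoopA_run (L : List Char) (c : Char) :
    ∀ (k : Nat) (rest curr : List Char) (res : List String),
      (∀ d, rest.head? = some d → d ≠ c) →
      pvLoopA L (List.replicate (k+1) c ++ rest) curr res =
        pvLoopA L rest []
          (res ++ (if (curr ++ if L.contains c then List.replicate (k+1) c else []) = []
                   then [] else [String.ofList (curr ++ if L.contains c then List.replicate (k+1) c else [])])) := by
  intro k
  induction k with
  | zero =>
    intro rest curr res h
    cases rest with
    | nil =>
      simp only [List.replicate, pvLoopA]
      by_cases hc : c ∈ L <;> simp <;> split_ifs <;> simp_all [pvLoopA]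
    | cons d t =>
      have hdc : d ≠ c := h d rfl
      simp only [List.replicate, List.cons_append, List.nil_append, pvLoopA]
      by_cases hc : L.contains c <;> simp [hdc] <;> split_ifs <;> simp_all
  | succ k ih =>
    intro rest curr res h
    have hsp : List.replicate (k+1+1) c ++ rest = c :: c :: (List.replicate k c ++ rest) := by
      simp [List.replicate_succ]
    have hsp2 : List.replicate (k+1) c ++ rest = c :: (List.replicate k c ++ rest) := by
      simp [List.replicate_succ]
    have harg : ∀ cu : List Char, ((if L.contains c then cu ++ [c] else cu) ++
        if L.contains c then List.replicate (k+1) c else []) =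
        cu ++ if L.contains c then List.replicate (k+1+1) c else [] := by
      intro cu; by_cases hc : c ∈ L <;> simp [hc, List.replicate_succ]
    rw [hsp]
    have hstep : pvLoopA L (c :: c :: (List.replicate k c ++ rest)) curr res =
        pvLoopA L (c :: (List.replicate k c ++ rest)) (if L.contains c then curr ++ [c] else curr) res := by
      simp [pvLoopA]
    rw [hstep, ← hsp2, ih rest _ res h, harg]

-- takeWhile (· == c) is a block of copies of c.
theorem takeWhile_eq_replicate (c : Char) (l : List Char) :
    l.takeWhile (· == c) = List.replicate (l.takeWhile (· == c)).length c := by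
  apply List.eq_replicate_of_mem
  intro b hb
  have := List.mem_takeWhile_imp hb
  simpa using this.symm

-- Main invariant: the loop with empty curr appends exactly the filtered runs.
theorem pvLoopA_eq_runs (L : List Char) :
    ∀ (l : List Char) (res : List String),
      pvLoopA L l [] res =
        res ++ ((pvRuns l).filter
            (fun r => match r with | [] => false | c :: _ => L.contains c)).map
          (fun r => String.ofList r) := by
  intro l
  induction l using pvRuns.induct with
  | case1 => intro res; simp [pvLoopA, pvRuns]
  | case2 c rest ih =>
    intro res
    have hsplit : c :: rest =
        List.replicate ((rest.takeWhile (· == c)).length + 1) c ++ rest.dropWhile (· == c) := by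
      rw [List.replicate_succ, List.cons_append, ← takeWhile_eq_replicate c rest,
        List.takeWhile_append_dropWhile]
    have hhead : ∀ d, (rest.dropWhile (· == c)).head? = some d → d ≠ c := by
      intro d hd
      have := List.head?_dropWhile_not (· == c) rest
      rw [hd] at this
      simpa using this
    conv_lhs => rw [hsplit]
    rw [pvLoopA_run L c (rest.takeWhile (· == c)).length _ [] res hhead, ih,
      List.append_assoc]
    congr 1
    rw [pvRuns]
    by_cases hc : c ∈ L <;>
      simp [hc, List.replicate_succ, ← takeWhile_eq_replicate c rest]

-- ===== VERDICT (by name: the statement is the Claim_ definition above) =====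
theorem getStreaks_spec : Claim_equal_getStreaks := by
  intro sequence letters _
  unfold Spec_getStreaks getStreaks getStreaks_alt
  rw [pvLoopA_eq_runs]
  simp
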